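-- pv_equiv track=rewrite | github.com/efabless/openlane2 | openlane/scripts/odbpy/io_place.py | grid_to_tracks
-- ===== SOURCE A (Python) =====
-- def grid_to_tracks(origin, count, step):
--     tracks = []
--     pos = origin
--     for _ in range(count):
--         tracks.append(pos)
--         pos += step
--     assert len(tracks) > 0
--     tracks.sort()
--
--     return tracks
-- ===== SOURCE B (Python) =====
-- def grid_to_tracks(origin, count, step):
--     assert count > 0
--     lo = min(origin, origin + (count - 1) * step)
--     return [lo + i * abs(step) for i in range(count)]
-- ===== Notes on version B (the rewrite author's own statement) =====
-- stated objective: alternative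
-- what changed: B never builds the unsorted track list at all: it computes the minimum endpoint of the arithmetic progression in O(1) and emits the already-ascending sequence lo + i*abs(step) directly, so there is no accumulation loop, no sort and no reverse.
import Mathlib
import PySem

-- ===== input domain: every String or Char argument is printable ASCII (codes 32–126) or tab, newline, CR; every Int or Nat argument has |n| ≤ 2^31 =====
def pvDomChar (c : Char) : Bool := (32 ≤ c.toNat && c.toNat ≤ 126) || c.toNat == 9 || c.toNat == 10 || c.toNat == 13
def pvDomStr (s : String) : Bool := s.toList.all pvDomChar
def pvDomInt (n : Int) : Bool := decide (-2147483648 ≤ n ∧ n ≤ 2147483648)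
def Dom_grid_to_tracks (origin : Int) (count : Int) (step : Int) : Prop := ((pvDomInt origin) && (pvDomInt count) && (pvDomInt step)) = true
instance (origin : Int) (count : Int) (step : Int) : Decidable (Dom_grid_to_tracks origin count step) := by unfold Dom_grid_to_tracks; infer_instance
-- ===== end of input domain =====

-- B skips A's accumulate-then-sort entirely: it computes the minimum endpoint of the
-- arithmetic progression and emits the ascending sequence lo + i*|step| directly.

-- ===== PORT A =====
-- tracks = []; pos = origin; for _ in range(count): tracks.append(pos); pos += step; tracks.sort()
def grid_to_tracks (origin : Int) (count : Int) (step : Int) : List Int :=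
  let st := (PySem.List.pyRange 0 count 1).foldl
      (fun (st : List Int × Int) _ => (st.1 ++ [st.2], st.2 + step)) (([] : List Int), origin)
  PySem.List.sorted st.1 (fun x => x) false

-- ===== PORT B =====
-- lo = min(origin, origin + (count-1)*step); [lo + i*abs(step) for i in range(count)]
def grid_to_tracks_alt (origin : Int) (count : Int) (step : Int) : List Int :=
  let lo := min origin (origin + (count - 1) * step)
  (PySem.List.pyRange 0 count 1).map (fun i => lo + i * |step|)

-- ===== PRECONDITION & SPEC =====
-- A asserts a nonempty track list (and B asserts count > 0): count ≤ 0 raises AssertionError in both.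
def Pre_grid_to_tracks (origin : Int) (count : Int) (step : Int) : Prop := 1 ≤ count
instance (origin : Int) (count : Int) (step : Int) : Decidable (Pre_grid_to_tracks origin count step) := by unfold Pre_grid_to_tracks; infer_instance
def pvWitness_grid_to_tracks : Int × Int × Int := (5, 3, -2)

def Spec_grid_to_tracks (origin : Int) (count : Int) (step : Int) (out : List Int) : Prop := out = grid_to_tracks_alt origin count step
instance (origin : Int) (count : Int) (step : Int) (out : List Int) : Decidable (Spec_grid_to_tracks origin count step out) := by unfold Spec_grid_to_tracks; infer_instance

-- ===== CLAIM =====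
def Claim_equal_grid_to_tracks : Prop := ∀ (origin : Int) (count : Int) (step : Int), Dom_grid_to_tracks origin count step → Pre_grid_to_tracks origin count step → Spec_grid_to_tracks origin count step (grid_to_tracks origin count step)

-- ===== LEMMAS AND PROOFS =====

-- A's loop accumulates exactly the arithmetic sequence, in order.
theorem loopA_char (step : Int) : ∀ (l : List Int) (acc : List Int) (p : Int),
    (l.foldl (fun (st : List Int × Int) _ => (st.1 ++ [st.2], st.2 + step)) (acc, p)).1
      = acc ++ (List.range l.length).map (fun k : Nat => p + (k : Int) * step) := by
  intro l
  induction l with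
  | nil => intro acc p; simp
  | cons x t ih =>
      intro acc p
      simp only [List.foldl_cons, ih (acc ++ [p]) (p + step), List.length_cons,
        List.range_succ_eq_map, List.map_cons, List.map_map, List.append_assoc,
        List.singleton_append]
      congr 1
      congr 1
      · simp
      · refine List.map_congr_left fun k _ => ?_
        simp only [Function.comp_apply]
        push_cast
        ring

theorem tracks_eq (origin count step : Int) :
    ((PySem.List.pyRange 0 count 1).foldl
      (fun (st : List Int × Int) _ => (st.1 ++ [st.2], st.2 + step)) (([] : List Int), origin)).1
     = (PySem.List.pyRange 0 count 1).map (fun i => origin + i * step) := by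
  rw [loopA_char, PySem.List.pyRange_one, List.length_map, List.length_range,
    List.map_map, List.nil_append]
  refine List.map_congr_left fun k _ => ?_
  simp

-- B's output is a permutation of A's unsorted tracks and is strictly... (≤)-pairwise;
-- split on the sign of step.
theorem grid_to_tracks_spec' (origin count step : Int) (hc : 1 ≤ count) :
    grid_to_tracks origin count step = grid_to_tracks_alt origin count step := by
  unfold grid_to_tracks grid_to_tracks_alt
  simp only [tracks_eq]
  by_cases hs : 0 ≤ step
  · -- lo = origin, |step| = step: B is exactly A's (already ascending) track list.
    have hlo : min origin (origin + (count - 1) * step) = origin := by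
      have : 0 ≤ (count - 1) * step := mul_nonneg (by omega) hs
      omega
    have habs : |step| = step := abs_of_nonneg hs
    rw [hlo, habs]
    refine PySem.List.sorted_eq_self_of_pairwise _ _ ?_
    rw [List.pairwise_map]
    refine List.Pairwise.imp ?_ (PySem.List.pairwise_lt_pyRange_one (a := 0) (b := count))
    intro a b hab
    have : 0 ≤ (b - a) * step := mul_nonneg (by omega) hs
    nlinarith
  · -- step < 0: B is the reverse of A's track list (index i ↦ count-1-i), strictly ascending.
    push Not at hs
    have hlo : min origin (origin + (count - 1) * step) = origin + (count - 1) * step := by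
      have : (count - 1) * step ≤ 0 := mul_nonpos_of_nonneg_of_nonpos (by omega) (le_of_lt hs)
      omega
    have habs : |step| = -step := abs_of_neg hs
    rw [hlo, habs]
    refine PySem.List.sorted_eq_of_perm_of_pairwise_lt _ _ _ ?_ ?_
    · -- permutation: B's list is the reverse of A's list
      have hrev : ((PySem.List.pyRange 0 count 1).map (fun i => origin + i * step)).reverse
          = (PySem.List.pyRange 0 count 1).map
              (fun i => origin + (count - 1) * step + i * -step) := by
        rw [PySem.List.pyRange_one]
        simp only [List.map_map]
        apply List.ext_getElem
        · simp
        · intro k h1 h2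
          simp only [List.length_map, List.length_range] at h2
          rw [List.getElem_reverse]
          simp only [List.getElem_map, List.getElem_range, Function.comp_apply,
            List.length_map, List.length_range]
          have hcast : (((count - 0).toNat - 1 - k : Nat) : Int) = count - 1 - (k : Int) := by
            omega
          rw [hcast]
          ring
      rw [← hrev]
      exact List.reverse_perm _
    · rw [List.pairwise_map]
      refine List.Pairwise.imp ?_ (PySem.List.pairwise_lt_pyRange_one (a := 0) (b := count))
      intro a b hab
      have : 0 < (b - a) * (-step) := mul_pos (by omega) (by omega)
      nlinarith

-- ===== VERDICT =====
theorem grid_to_tracks_spec : Claim_equal_grid_to_tracks := by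
  intro origin count step _ hpre
  exact grid_to_tracks_spec' origin count step hpre
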